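-- pv_equiv track=rewrite | github.com/kasztp/python-learning | googlechallenges.py | count_salutes
-- ===== SOURCE A (Python) =====
-- def count_salutes(s):
--     left = 0
--     right = 0
--     for index, item in enumerate(s):
--         if (item == '<') & (right != 0):
--             left += s.count('>', 0, index)
--         elif item == '>':
--             right += s.count('<', index + 1)
--     salutes = left + right
--     return salutes
-- ===== SOURCE B (Python) =====
-- def count_salutes(s):
--     pairs = 0
--     for k, part in enumerate(s.split('>')):
--         pairs += k * part.count('<')
--     return 2 * pairs
-- ===== Notes on version B (the rewrite author's own statement) =====
-- stated objective: faster
-- what changed: Replaces A's per-character loop with repeated s.count() rescans by one s.split('>') pass: the result is twice the number of ('>' before '<') pairs, computed as sum of k * parts[k].count('<') over the split segments.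
import Mathlib
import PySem

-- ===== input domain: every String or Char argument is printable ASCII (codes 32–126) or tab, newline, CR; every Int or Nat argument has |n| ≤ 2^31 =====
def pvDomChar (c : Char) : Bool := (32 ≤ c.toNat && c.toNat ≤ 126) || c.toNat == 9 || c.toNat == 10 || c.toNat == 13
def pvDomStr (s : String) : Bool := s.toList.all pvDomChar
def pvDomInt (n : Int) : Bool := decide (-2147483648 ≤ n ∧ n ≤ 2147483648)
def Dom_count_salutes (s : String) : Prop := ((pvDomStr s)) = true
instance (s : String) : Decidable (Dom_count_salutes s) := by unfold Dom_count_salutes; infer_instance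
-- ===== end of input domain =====

-- B replaces A's per-character rescans by one split('>') pass: the answer is twice the number
-- of ('>' before '<') pairs, summed per split segment; same return value everywhere.

-- ===== PORT A =====
-- the for-loop of A as structural recursion over enumerate(s); s.count('>', 0, index) and
-- s.count('<', index + 1) are ported as counts over the corresponding slices (exact here:
-- single-char needle, 0 ≤ index ≤ len(s))
def pvLoopA (cs : List Char) : List (Int × Char) → Int → Int → Int
  | [], left, right => left + right
  | (i, c) :: rest, left, right =>
    if c == '<' && right != 0 then
      pvLoopA cs rest (left + ((PySem.List.slice cs (some 0) (some i)).count '>' : Int)) right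
    else if c == '>' then
      pvLoopA cs rest left (right + ((PySem.List.slice cs (some (i + 1)) none).count '<' : Int))
    else
      pvLoopA cs rest left right

def count_salutes (s : String) : Int :=
  pvLoopA s.toList (PySem.List.enumerate s.toList 0) 0 0

-- ===== PORT B =====
-- s.split('>') via PySem.Str.split?; the separator ">" is nonempty, so split? is always
-- `some` and `.getD []` only unwraps it; the for-loop accumulating `pairs` is the foldl
def count_salutes_alt (s : String) : Int :=
  2 * ((PySem.List.enumerate ((PySem.Str.split? s ">").getD []) 0).foldl
        (fun pairs kp => pairs + kp.1 * (PySem.Str.count kp.2 "<" : Int)) 0)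

-- ===== PRECONDITION & SPEC =====
def Spec_count_salutes (s : String) (out : Int) : Prop := out = count_salutes_alt s
instance (s : String) (out : Int) : Decidable (Spec_count_salutes s out) := by unfold Spec_count_salutes; infer_instance

-- ===== CLAIM (what is proved, stated in full; the proofs are below) =====
def Claim_equal_count_salutes : Prop := ∀ (s : String), Dom_count_salutes s → Spec_count_salutes s (count_salutes s)

-- ===== LEMMAS AND PROOFS =====

-- # of ('>' at j, '<' at i, j < i) pairs in cs: both of A's accumulators sum to this
def pvP : List Char → Int
  | [] => 0
  | c :: t => (if c = '>' then (t.count '<' : Int) else 0) + pvP t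

def pvConsHead (pre : List Char) : List (List Char) → List (List Char)
  | [] => [pre]
  | h :: t => (pre ++ h) :: t

-- structural model of cs.split('>')
def pvSplitGt : List Char → List (List Char)
  | [] => [[]]
  | c :: t => if c = '>' then [] :: pvSplitGt t else pvConsHead [c] (pvSplitGt t)

-- total '<' over segments
def pvT : List (List Char) → Int
  | [] => 0
  | h :: t => (h.count '<' : Int) + pvT t

-- Σ (i + k) * (segment k).count '<'
def pvG : List (List Char) → Int → Int
  | [], _ => 0
  | h :: t, i => i * (h.count '<' : Int) + pvG t (i + 1)

theorem pvSliceTake (pre rest : List Char) :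
    PySem.List.slice (pre ++ rest) (some 0) (some (pre.length : Int)) = pre := by
  rw [PySem.List.slice_zero_start, PySem.List.slice_to_natCast]
  simp

theorem pvSliceDrop (pre : List Char) (c : Char) (rest : List Char) :
    PySem.List.slice (pre ++ c :: rest) (some ((pre.length : Int) + 1)) none = rest := by
  have h : ((pre.length : Int) + 1) = (((pre.length + 1 : Nat) : Nat) : Int) := by push_cast; ring
  rw [h, PySem.List.slice_from_natCast,
    show pre ++ c :: rest = (pre ++ [c]) ++ rest by simp,
    List.drop_left' (by simp)]

theorem pvCastLen (pre : List Char) (c : Char) :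
    ((pre.length : Int) + 1) = (((pre ++ [c]).length : Nat) : Int) := by
  simp

-- closed form of A's loop: 2 × the pair count, plus cross terms of the already-consumed prefix
theorem pvLoopA_closed (rest : List Char) : ∀ (pre : List Char) (left right : Int),
    0 ≤ right →
    (pre.count '>' ≠ 0 → rest.count '<' ≠ 0 → right ≠ 0) →
    pvLoopA (pre ++ rest) (PySem.List.enumerate rest (pre.length : Int)) left right
      = left + right + (pre.count '>' : Int) * (rest.count '<' : Int) + 2 * pvP rest := by
  induction rest with
  | nil =>
    intro pre left right _ _
    simp [pvLoopA, pvP, PySem.List.enumerate_nil]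
  | cons c rest' ih =>
    intro pre left right hr0 H
    rw [PySem.List.enumerate_cons]
    by_cases hc : c = '<'
    · subst hc
      by_cases hr : right = 0
      · subst hr
        have hg : pre.count '>' = 0 := by
          by_contra hg
          exact (H hg (by simp)) rfl
        have hA : pvLoopA (pre ++ '<' :: rest')
              (((pre.length : Int), '<') :: PySem.List.enumerate rest' ((pre.length : Int) + 1)) left 0
            = pvLoopA (pre ++ '<' :: rest')
              (PySem.List.enumerate rest' ((pre.length : Int) + 1)) left 0 := by
          simp [pvLoopA]
        rw [hA, show pre ++ '<' :: rest' = (pre ++ ['<']) ++ rest' by simp, pvCastLen pre '<',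
          ih (pre ++ ['<']) left 0 le_rfl
            (by intro hg' _; simp [List.count_append, hg] at hg')]
        simp [pvP, List.count_append, hg]
      · have hA : pvLoopA (pre ++ '<' :: rest')
              (((pre.length : Int), '<') :: PySem.List.enumerate rest' ((pre.length : Int) + 1)) left right
            = pvLoopA (pre ++ '<' :: rest')
              (PySem.List.enumerate rest' ((pre.length : Int) + 1))
              (left + (((PySem.List.slice (pre ++ '<' :: rest') (some 0) (some (pre.length : Int))).count '>' : Nat) : Int)) right := by
          simp [pvLoopA, hr]
        rw [hA, pvSliceTake pre ('<' :: rest'),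
          show pre ++ '<' :: rest' = (pre ++ ['<']) ++ rest' by simp, pvCastLen pre '<',
          ih (pre ++ ['<']) _ right hr0 (by intro _ _; exact hr)]
        simp [pvP, List.count_append]
        ring
    · by_cases hc2 : c = '>'
      · subst hc2
        have hA : pvLoopA (pre ++ '>' :: rest')
              (((pre.length : Int), '>') :: PySem.List.enumerate rest' ((pre.length : Int) + 1)) left right
            = pvLoopA (pre ++ '>' :: rest')
              (PySem.List.enumerate rest' ((pre.length : Int) + 1)) left
              (right + (((PySem.List.slice (pre ++ '>' :: rest') (some ((pre.length : Int) + 1)) none).count '<' : Nat) : Int)) := by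
          simp [pvLoopA]
        rw [hA, pvSliceDrop pre '>' rest',
          show pre ++ '>' :: rest' = (pre ++ ['>']) ++ rest' by simp, pvCastLen pre '>',
          ih (pre ++ ['>']) left _ (by positivity)
            (by
              intro _ hcl hz
              have hp : (0:Int) < (rest'.count '<' : Int) := by
                exact_mod_cast Nat.pos_of_ne_zero hcl
              omega)]
        simp [pvP, List.count_append]
        ring
      · have hA : pvLoopA (pre ++ c :: rest')
              (((pre.length : Int), c) :: PySem.List.enumerate rest' ((pre.length : Int) + 1)) left right
            = pvLoopA (pre ++ c :: rest')
              (PySem.List.enumerate rest' ((pre.length : Int) + 1)) left right := by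
          simp [pvLoopA, hc, hc2]
        rw [hA, show pre ++ c :: rest' = (pre ++ [c]) ++ rest' by simp, pvCastLen pre c,
          ih (pre ++ [c]) left right hr0
            (by
              intro hg hcl
              refine H ?_ ?_
              · simpa [List.count_append, hc2] using hg
              · simpa [List.count_cons, hc] using hcl)]
        simp [pvP, List.count_append, hc, hc2]

theorem pvSplitGt_ne_nil (cs : List Char) : pvSplitGt cs ≠ [] := by
  cases cs with
  | nil => simp [pvSplitGt]
  | cons c t =>
    by_cases h : c = '>'
    · simp [pvSplitGt, h]
    · simp only [pvSplitGt, if_neg h]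
      cases pvSplitGt t <;> simp [pvConsHead]

theorem pvConsHead_nil (L : List (List Char)) (h : L ≠ []) : pvConsHead [] L = L := by
  cases L with
  | nil => exact absurd rfl h
  | cons a t => simp [pvConsHead]

theorem pvConsHead_consHead (p : List Char) (c : Char) (L : List (List Char)) :
    pvConsHead p (pvConsHead [c] L) = pvConsHead (p ++ [c]) L := by
  cases L <;> simp [pvConsHead]

theorem pvGo_split : ∀ (fuel : Nat) (l cur : List Char) (acc : List (List Char)),
    l.length ≤ fuel →
    PySem.Chars.splitOn.go ['>'] fuel l cur acc
      = acc.reverse ++ pvConsHead cur.reverse (pvSplitGt l) := by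
  intro fuel
  induction fuel with
  | zero =>
    intro l cur acc hl
    have : l = [] := by cases l <;> simp_all
    subst this
    simp [PySem.Chars.splitOn.go, pvSplitGt, pvConsHead]
  | succ f ihf =>
    intro l cur acc hl
    cases l with
    | nil => simp [PySem.Chars.splitOn.go, pvSplitGt, pvConsHead]
    | cons c rest =>
      by_cases hc : c = '>'
      · subst hc
        have hpre : (['>'] : List Char).isPrefixOf ('>' :: rest) = true := by simp [List.isPrefixOf]
        rw [show PySem.Chars.splitOn.go ['>'] (f + 1) ('>' :: rest) cur acc
              = PySem.Chars.splitOn.go ['>'] f rest [] (cur.reverse :: acc) by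
            simp [PySem.Chars.splitOn.go, hpre]]
        rw [ihf rest [] (cur.reverse :: acc) (by simpa using Nat.lt_succ_iff.mp (by simpa using hl))]
        simp only [List.reverse_nil]
        rw [pvConsHead_nil _ (pvSplitGt_ne_nil rest)]
        simp [pvSplitGt, pvConsHead]
      · have hpre : (['>'] : List Char).isPrefixOf (c :: rest) = false := by
          simp [List.isPrefixOf]; exact fun h => hc h.symm
        rw [show PySem.Chars.splitOn.go ['>'] (f + 1) (c :: rest) cur acc
              = PySem.Chars.splitOn.go ['>'] f rest (c :: cur) acc by
            simp [PySem.Chars.splitOn.go, hpre]]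
        rw [ihf rest (c :: cur) acc (by simpa using Nat.lt_succ_iff.mp (by simpa using hl))]
        simp [pvSplitGt, if_neg hc, pvConsHead_consHead]

theorem pvSplitOn_eq (cs : List Char) : PySem.Chars.splitOn cs ['>'] = pvSplitGt cs := by
  rw [show PySem.Chars.splitOn cs ['>'] = PySem.Chars.splitOn.go ['>'] (cs.length + 1) cs [] [] from rfl,
    pvGo_split (cs.length + 1) cs [] [] (by omega)]
  simp [pvConsHead_nil _ (pvSplitGt_ne_nil cs)]

theorem pvCountGo_eq : ∀ (fuel : Nat) (l : List Char) (acc : Nat),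
    l.length ≤ fuel →
    PySem.Chars.count.go ['<'] fuel l acc = acc + l.count '<' := by
  intro fuel
  induction fuel with
  | zero =>
    intro l acc hl
    have : l = [] := by cases l <;> simp_all
    subst this
    simp [PySem.Chars.count.go]
  | succ f ihf =>
    intro l acc hl
    cases l with
    | nil => simp [PySem.Chars.count.go]
    | cons c rest =>
      by_cases hc : c = '<'
      · subst hc
        have hpre : (['<'] : List Char).isPrefixOf ('<' :: rest) = true := by simp [List.isPrefixOf]
        rw [show PySem.Chars.count.go ['<'] (f + 1) ('<' :: rest) acc
              = PySem.Chars.count.go ['<'] f rest (acc + 1) by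
            simp [PySem.Chars.count.go, hpre]]
        rw [ihf rest (acc + 1) (by simpa using Nat.lt_succ_iff.mp (by simpa using hl))]
        simp
        omega
      · have hpre : (['<'] : List Char).isPrefixOf (c :: rest) = false := by
          simp [List.isPrefixOf]; exact fun h => hc h.symm
        rw [show PySem.Chars.count.go ['<'] (f + 1) (c :: rest) acc
              = PySem.Chars.count.go ['<'] f rest acc by
            simp [PySem.Chars.count.go, hpre]]
        rw [ihf rest acc (by simpa using Nat.lt_succ_iff.mp (by simpa using hl))]
        simp [hc]

theorem pvCount_eq (cs : List Char) : PySem.Chars.count cs ['<'] = cs.count '<' := by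
  rw [show PySem.Chars.count cs ['<'] = PySem.Chars.count.go ['<'] cs.length cs 0 from rfl,
    pvCountGo_eq cs.length cs 0 le_rfl]
  simp

theorem pvFoldG : ∀ (L : List (List Char)) (i a : Int),
    (PySem.List.enumerate (L.map String.ofList) i).foldl
        (fun pairs kp => pairs + kp.1 * (PySem.Str.count kp.2 "<" : Int)) a
      = a + pvG L i := by
  intro L
  induction L with
  | nil => intro i a; simp [pvG, PySem.List.enumerate_nil]
  | cons h t ih =>
    intro i a
    rw [List.map_cons, PySem.List.enumerate_cons, List.foldl_cons, ih]
    have : PySem.Str.count (String.ofList h) "<" = h.count '<' := by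
      rw [PySem.Str.count_eq]
      simp [pvCount_eq]
    rw [this]
    simp [pvG]
    ring

theorem pvG_shift : ∀ (L : List (List Char)) (i : Int), pvG L (i + 1) = pvG L i + pvT L := by
  intro L
  induction L with
  | nil => intro i; simp [pvG, pvT]
  | cons h t ih => intro i; simp [pvG, pvT, ih]; ring

theorem pvT_consHead (p : List Char) (L : List (List Char)) :
    pvT (pvConsHead p L) = (p.count '<' : Int) + pvT L := by
  cases L with
  | nil => simp [pvConsHead, pvT]
  | cons h t => simp [pvConsHead, pvT, List.count_append]; ring

theorem pvT_split (cs : List Char) : pvT (pvSplitGt cs) = (cs.count '<' : Int) := by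
  induction cs with
  | nil => simp [pvSplitGt, pvT]
  | cons c t ih =>
    by_cases hc : c = '>'
    · subst hc; simp [pvSplitGt, pvT, ih]
    · rw [show pvSplitGt (c :: t) = pvConsHead [c] (pvSplitGt t) by simp [pvSplitGt, hc],
        pvT_consHead, ih]
      simp [List.count_cons]
      by_cases h2 : c = '<'
      · simp [h2]; ring
      · simp [h2]

theorem pvG_split (cs : List Char) : pvG (pvSplitGt cs) 0 = pvP cs := by
  induction cs with
  | nil => simp [pvSplitGt, pvG, pvP]
  | cons c t ih =>
    by_cases hc : c = '>'
    · subst hc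
      rw [show pvSplitGt ('>' :: t) = [] :: pvSplitGt t by simp [pvSplitGt]]
      simp only [pvG, pvP]
      rw [show (0 : Int) + 1 = 0 + 1 by rfl, pvG_shift, ih, pvT_split]
      norm_num
      ring
    · rw [show pvSplitGt (c :: t) = pvConsHead [c] (pvSplitGt t) by simp [pvSplitGt, hc]]
      obtain ⟨h, hs, hh⟩ := List.exists_cons_of_ne_nil (pvSplitGt_ne_nil t)
      rw [hh]
      simp only [pvConsHead, pvG]
      simp only [pvP, if_neg hc]
      rw [hh] at ih
      simp only [pvG] at ih
      simpa using ih

theorem pvA_closed (s : String) : count_salutes s = 2 * pvP s.toList := by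
  unfold count_salutes
  have := pvLoopA_closed s.toList [] 0 0 le_rfl (by simp)
  simpa using this

theorem pvB_closed (s : String) : count_salutes_alt s = 2 * pvP s.toList := by
  unfold count_salutes_alt
  have hsplit : (PySem.Str.split? s ">").getD []
      = (pvSplitGt s.toList).map String.ofList := by
    rw [show PySem.Str.split? s ">"
          = ((PySem.Chars.split? s.toList ">".toList).map (List.map String.ofList)) from rfl]
    rw [show (">".toList : List Char) = ['>'] from rfl]
    rw [show PySem.Chars.split? s.toList ['>'] = some (PySem.Chars.splitOn s.toList ['>']) by
      simp [PySem.Chars.split?]]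
    simp [pvSplitOn_eq]
  rw [hsplit, pvFoldG, pvG_split]
  simp

-- ===== VERDICT (by name: the statement is the Claim_ definition above) =====
theorem count_salutes_spec : Claim_equal_count_salutes := by
  intro s _
  unfold Spec_count_salutes
  rw [pvA_closed, pvB_closed]
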